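-- pv_equiv track=rewrite | github.com/jihun315016/Code-Practice | 카카오 인턴 - 크레인 인형뽑기 게임.py | getPointer
-- ===== SOURCE A (Python) =====
-- def getPointer(board):
--     pointer = [0] * len(board)
--
--     for i in range(len(board)):
--         for j in range(len(board)):
--             if board[j][i] > 0:
--                 pointer[i] = j;
--                 break
--
--     return pointer
-- ===== SOURCE B (Python) =====
-- def getPointer(board):
--     n = len(board)
--     pointer = [0] * n
--     for j in reversed(range(n)):
--         row = board[j]
--         for i in range(n):
--             if row[i] > 0:
--                 pointer[i] = j
--     return pointer
-- ===== Notes on version B (the rewrite author's own statement) =====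
-- stated objective: alternative
-- what changed: A scans each column top-to-bottom and stops at the first positive cell (first-match with break); B sweeps the rows bottom-to-top once and unconditionally overwrites pointer[i] on every positive cell, so the last write per column (the topmost positive row) wins - no break and no per-column search.
-- outside the precondition, e.g. on getPointer([[1, 1], [5]]): A returns [0, 0], B raises IndexError
import Mathlib
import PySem

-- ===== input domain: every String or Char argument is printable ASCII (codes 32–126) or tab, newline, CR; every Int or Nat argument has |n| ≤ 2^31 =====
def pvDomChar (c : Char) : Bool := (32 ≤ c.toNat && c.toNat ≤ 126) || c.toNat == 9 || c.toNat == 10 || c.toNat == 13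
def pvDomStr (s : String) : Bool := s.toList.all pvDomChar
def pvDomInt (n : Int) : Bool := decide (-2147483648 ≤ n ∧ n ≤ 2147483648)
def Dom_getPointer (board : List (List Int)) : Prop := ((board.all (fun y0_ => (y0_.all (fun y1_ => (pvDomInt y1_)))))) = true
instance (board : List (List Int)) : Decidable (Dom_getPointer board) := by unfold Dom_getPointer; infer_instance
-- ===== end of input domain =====

-- B replaces A's per-column top-down search (break at the first positive cell) by one
-- bottom-to-top row sweep that unconditionally overwrites pointer[i] on every positive
-- cell, so the last write per column (the topmost positive row) wins; same O(n^2) cost.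
-- board[j][i]; under Pre_ both indices are in range, so the default 0 is never used
def pvCell (board : List (List Int)) (j i : Int) : Int :=
  PySem.List.pyGetD (PySem.List.pyGetD board j []) i 0

-- ===== PORT A =====
-- inner 'for j in range(n): if board[j][i] > 0: pointer[i] = j; break'
def pvInnerA (board : List (List Int)) (i : Int) : List Int → List Int → List Int
  | [], pointer => pointer
  | j :: js, pointer =>
      if 0 < pvCell board j i then pointer.set i.toNat j else pvInnerA board i js pointer

def getPointer (board : List (List Int)) : List Int :=
  (PySem.List.pyRange 0 (board.length : Int) 1).foldl
    (fun pointer i => pvInnerA board i (PySem.List.pyRange 0 (board.length : Int) 1) pointer)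
    (List.replicate board.length 0)

-- ===== PORT B =====
-- inner 'for i in range(n): if row[i] > 0: pointer[i] = j' (overwrite, no break)
def pvRowStepB (row : List Int) (j : Int) (pointer : List Int) (i : Int) : List Int :=
  if 0 < PySem.List.pyGetD row i 0 then pointer.set i.toNat j else pointer

def getPointer_alt (board : List (List Int)) : List Int :=
  ((PySem.List.pyRange 0 (board.length : Int) 1).reverse).foldl
    (fun pointer j =>
      let row := PySem.List.pyGetD board j []
      (PySem.List.pyRange 0 (board.length : Int) 1).foldl (pvRowStepB row j) pointer)
    (List.replicate board.length 0)

-- ===== PRECONDITION & SPEC =====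
-- Pre_ excludes ragged boards (some row shorter than len(board)): there the Python A
-- either raises IndexError or returns only thanks to early breaks, and B's full sweep raises.
def Pre_getPointer (board : List (List Int)) : Prop :=
  ∀ row ∈ board, board.length ≤ row.length
instance (board : List (List Int)) : Decidable (Pre_getPointer board) := by
  unfold Pre_getPointer; infer_instance

def pvWitness_getPointer : List (List Int) := [[1, 0], [0, 2]]

def Spec_getPointer (board : List (List Int)) (out : List Int) : Prop := out = getPointer_alt board
instance (board : List (List Int)) (out : List Int) : Decidable (Spec_getPointer board out) := by
  unfold Spec_getPointer; infer_instance

-- ===== CLAIM (what is proved, stated in full; the proofs are below) =====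
def Claim_equal_getPointer : Prop :=
  ∀ (board : List (List Int)), Dom_getPointer board → Pre_getPointer board →
    Spec_getPointer board (getPointer board)

-- ===== LEMMAS AND PROOFS =====

-- first row (scanning top to bottom over all n rows) whose cell in column i is positive, else 0
def pvSpecVal (board : List (List Int)) (i : Int) : Int :=
  match (PySem.List.pyRange 0 (board.length : Int) 1).find?
      (fun j => decide (0 < pvCell board j i)) with
  | some j => j
  | none => 0

def pvSpecList (board : List (List Int)) : List Int :=
  (List.range board.length).map (fun k : Nat => pvSpecVal board (k : Int))

-- A's inner loop = find?
lemma pvInnerA_eq_find (board : List (List Int)) (i : Int) (js pointer : List Int) :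
    pvInnerA board i js pointer =
      match js.find? (fun j => decide (0 < pvCell board j i)) with
      | some j => pointer.set i.toNat j
      | none => pointer := by
  induction js with
  | nil => simp [pvInnerA]
  | cons j js ih =>
      by_cases h : 0 < pvCell board j i
      · simp [pvInnerA, h, List.find?]
      · simp [pvInnerA, h, List.find?, ih]

lemma pvFoldA (board : List (List Int)) :
    ∀ (m : Nat), m ≤ board.length →
    (PySem.List.pyRange 0 (m : Int) 1).foldl
      (fun pointer i => pvInnerA board i (PySem.List.pyRange 0 (board.length : Int) 1) pointer)
      (List.replicate board.length 0)
    = (List.range board.length).map (fun k => if k < m then pvSpecVal board (k : Int) else 0) := by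
  intro m
  induction m with
  | zero =>
      intro _
      rw [show PySem.List.pyRange 0 ((0 : Nat) : Int) 1 = [] by decide]
      simp only [List.foldl]
      have h0 : ∀ k ∈ List.range board.length,
          (if k < 0 then pvSpecVal board (k : Int) else (0:Int)) = 0 := fun k _ => by simp
      rw [List.map_congr_left h0, List.map_const', List.length_range]
  | succ m ih =>
      intro hm
      have hc : ((m + 1 : Nat) : Int) = (m : Int) + 1 := by push_cast; ring
      rw [hc, PySem.List.pyRange_one_succ_right (by positivity), List.foldl_append,
        ih (Nat.le_of_succ_le hm)]
      simp only [List.foldl]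
      rw [pvInnerA_eq_find]
      cases hf : (PySem.List.pyRange 0 (board.length : Int) 1).find?
          (fun j => decide (0 < pvCell board j (m : Int))) with
      | none =>
          apply List.ext_getElem
          · simp
          · intro k hk1 hk2
            simp only [List.getElem_map, List.getElem_range] at *
            by_cases hkm : k = m
            · subst hkm
              simp [pvSpecVal, hf]
            · simp only [List.length_map, List.length_range] at hk1
              have : k < m ↔ k < m + 1 := by omega
              simp [this]
      | some j =>
          simp only [Int.toNat_natCast]
          apply List.ext_getElem
          · simp
          · intro k hk1 hk2
            simp only [List.length_set, List.length_map, List.length_range] at hk1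
            rw [List.getElem_set]
            simp only [List.getElem_map, List.getElem_range]
            by_cases hkm : m = k
            · subst hkm
              simp [pvSpecVal, hf]
            · have : k < m ↔ k < m + 1 := by omega
              simp [hkm, this]

theorem getPointer_eq_spec (board : List (List Int)) :
    getPointer board = pvSpecList board := by
  unfold getPointer pvSpecList
  rw [pvFoldA board board.length le_rfl]
  exact List.map_congr_left (fun k hk => by simp [List.mem_range.mp hk])

-- B's inner loop (one row, overwrite at every positive cell), characterised pointwise
lemma pvRowB (board : List (List Int)) (j : Int) :
    ∀ (is : List Int) (p : List Int), (∀ i ∈ is, 0 ≤ i) →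
    (is.foldl (pvRowStepB (PySem.List.pyGetD board j []) j) p).length = p.length ∧
    (∀ t : Nat, (is.foldl (pvRowStepB (PySem.List.pyGetD board j []) j) p)[t]? =
        if (t : Int) ∈ is ∧ 0 < pvCell board j (t : Int) then (p.set t j)[t]? else p[t]?) := by
  intro is
  induction is with
  | nil =>
      intro p _
      exact ⟨rfl, fun t => by simp⟩
  | cons i is ih =>
      intro p hnn
      have hnn' : ∀ x ∈ is, (0:Int) ≤ x := fun x hx => hnn x (List.mem_cons_of_mem _ hx)
      have hi : (0:Int) ≤ i := hnn i List.mem_cons_self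
      by_cases hc : 0 < pvCell board j i
      · simp only [List.foldl_cons, pvRowStepB, show
          PySem.List.pyGetD (PySem.List.pyGetD board j []) i 0 = pvCell board j i from rfl,
          if_pos hc]
        obtain ⟨hlen, hptr⟩ := ih (p.set i.toNat j) hnn'
        refine ⟨by simpa using hlen, ?_⟩
        intro t
        rw [hptr t]
        by_cases hti : (t : Int) = i
        · have hit : i.toNat = t := by omega
          have hcell : 0 < pvCell board j (t : Int) := hti ▸ hc
          have hmemcons : (t : Int) ∈ i :: is := by simp [hti]
          rw [hit]
          by_cases hmem : (t : Int) ∈ is ∧ 0 < pvCell board j (t : Int)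
          · rw [if_pos hmem, if_pos ⟨hmemcons, hcell⟩, List.set_set]
          · rw [if_neg hmem, if_pos ⟨hmemcons, hcell⟩]
        · have hit : i.toNat ≠ t := by omega
          have hset : (p.set i.toNat j)[t]? = p[t]? := List.getElem?_set_ne hit
          have hset2 : ((p.set i.toNat j).set t j)[t]? = (p.set t j)[t]? := by
            rcases Nat.lt_or_ge t p.length with h | h
            · rw [List.getElem?_set_self (by simpa using h), List.getElem?_set_self h]
            · rw [List.getElem?_eq_none (by simpa using h),
                List.getElem?_eq_none (by simpa using h)]
          have hmemcons : ((t : Int) ∈ i :: is) ↔ (t : Int) ∈ is := by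
            simp [List.mem_cons, hti]
          simp only [hmemcons, hset2]
          split_ifs <;> simp [hset]
      · simp only [List.foldl_cons, pvRowStepB, show
          PySem.List.pyGetD (PySem.List.pyGetD board j []) i 0 = pvCell board j i from rfl,
          if_neg hc]
        obtain ⟨hlen, hptr⟩ := ih p hnn'
        refine ⟨hlen, ?_⟩
        intro t
        rw [hptr t]
        by_cases hti : (t : Int) = i
        · have : ¬ ((t : Int) ∈ i :: is ∧ 0 < pvCell board j (t : Int)) := by
            rintro ⟨-, h2⟩; exact hc (hti ▸ h2)
          rw [if_neg this]
          by_cases hmem : (t : Int) ∈ is ∧ 0 < pvCell board j (t : Int)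
          · exact absurd (hti ▸ hmem.2) hc
          · rw [if_neg hmem]
        · have hmemcons : ((t : Int) ∈ i :: is) ↔ (t : Int) ∈ is := by
            simp [List.mem_cons, hti]
          simp only [hmemcons]

-- set at the same index in two lists of equal length reads back the same
lemma pvSetGet_eq {p q : List Int} (h : p.length = q.length) (t : Nat) (j : Int) :
    (p.set t j)[t]? = (q.set t j)[t]? := by
  rcases Nat.lt_or_ge t p.length with hlt | hge
  · rw [List.getElem?_set_self hlt, List.getElem?_set_self (h ▸ hlt)]
  · rw [List.getElem?_eq_none (by simpa using hge),
      List.getElem?_eq_none (by simp; omega)]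

-- B's outer loop: the bottom-up sweep over the first m rows, generalised start pointer
lemma pvFoldB (board : List (List Int)) :
    ∀ (m : Nat), ∀ (p : List Int), p.length = board.length →
    ((((PySem.List.pyRange 0 (m : Int) 1).reverse).foldl
      (fun pointer j =>
        (PySem.List.pyRange 0 (board.length : Int) 1).foldl
          (pvRowStepB (PySem.List.pyGetD board j []) j) pointer) p).length = board.length) ∧
    (∀ t : Nat, (((PySem.List.pyRange 0 (m : Int) 1).reverse).foldl
      (fun pointer j =>
        (PySem.List.pyRange 0 (board.length : Int) 1).foldl
          (pvRowStepB (PySem.List.pyGetD board j []) j) pointer) p)[t]? =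
        match (PySem.List.pyRange 0 (m : Int) 1).find?
            (fun j => decide (0 < pvCell board j (t : Int))) with
        | some j => (p.set t j)[t]?
        | none => p[t]?) := by
  intro m
  induction m with
  | zero =>
      intro p hp
      rw [show PySem.List.pyRange 0 ((0 : Nat) : Int) 1 = [] by decide]
      exact ⟨by simpa using hp, fun t => by simp⟩
  | succ m ih =>
      intro p hp
      have hc : ((m + 1 : Nat) : Int) = (m : Int) + 1 := by push_cast; ring
      rw [hc, PySem.List.pyRange_one_succ_right (by positivity)]
      simp only [List.reverse_append, List.reverse_cons, List.reverse_nil, List.nil_append,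
        List.foldl_append, List.foldl_cons, List.foldl_nil]
      have hnn : ∀ i ∈ PySem.List.pyRange 0 (board.length : Int) 1, (0:Int) ≤ i :=
        fun i hi => ((PySem.List.mem_pyRange_one).mp hi).1
      obtain ⟨rlen, rptr⟩ := pvRowB board (m : Int)
        (PySem.List.pyRange 0 (board.length : Int) 1) p hnn
      set p' := (PySem.List.pyRange 0 (board.length : Int) 1).foldl
        (pvRowStepB (PySem.List.pyGetD board (m : Int) []) (m : Int)) p with hp'
      have hp'len : p'.length = board.length := by rw [rlen, hp]
      obtain ⟨ilen, iptr⟩ := ih p' hp'len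
      refine ⟨ilen, ?_⟩
      intro t
      rw [iptr t, List.find?_append]
      have htR : ((t : Int) ∈ PySem.List.pyRange 0 (board.length : Int) 1) ↔
          t < board.length := by
        rw [PySem.List.mem_pyRange_one]
        constructor
        · intro h; exact_mod_cast h.2
        · intro h; exact ⟨by positivity, by exact_mod_cast h⟩
      cases hf : (PySem.List.pyRange 0 (m : Int) 1).find?
          (fun j => decide (0 < pvCell board j (t : Int))) with
      | some j =>
          simp only [Option.some_or]
          exact pvSetGet_eq (hp'len.trans hp.symm) t j
      | none =>
          simp only [List.find?_cons, List.find?_nil]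
          by_cases hh : 0 < pvCell board (m : Int) (t : Int)
          · simp only [hh, decide_true, Option.none_or]
            rw [rptr t]
            by_cases ht : t < board.length
            · rw [if_pos ⟨htR.mpr ht, hh⟩]
            · rw [if_neg (by rintro ⟨h1, -⟩; exact ht (htR.mp h1)),
                List.getElem?_eq_none (by rw [hp]; omega),
                List.getElem?_eq_none (by simp [hp]; omega)]
          · simp only [hh, decide_false, Option.none_or]
            rw [rptr t, if_neg (by rintro ⟨-, h2⟩; exact hh h2)]

theorem getPointer_alt_eq_spec (board : List (List Int)) :
    getPointer_alt board = pvSpecList board := by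
  obtain ⟨hlen, hptr⟩ := pvFoldB board board.length (List.replicate board.length 0)
    (by simp)
  have halt : getPointer_alt board = ((PySem.List.pyRange 0 (board.length : Int) 1).reverse).foldl
      (fun pointer j =>
        (PySem.List.pyRange 0 (board.length : Int) 1).foldl
          (pvRowStepB (PySem.List.pyGetD board j []) j) pointer)
      (List.replicate board.length 0) := rfl
  rw [halt]
  apply List.ext_getElem?
  intro t
  rw [hptr t]
  unfold pvSpecList pvSpecVal
  rcases Nat.lt_or_ge t board.length with h | h
  · rw [List.getElem?_map, List.getElem?_range h]
    cases hf : (PySem.List.pyRange 0 (board.length : Int) 1).find?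
        (fun j => decide (0 < pvCell board j (t : Int))) with
    | some j => simp [hf, h]
    | none => simp [hf, h]
  · have hL : (match (PySem.List.pyRange 0 (board.length : Int) 1).find?
        (fun j => decide (0 < pvCell board j (t : Int))) with
      | some j => ((List.replicate board.length (0:Int)).set t j)[t]?
      | none => (List.replicate board.length (0:Int))[t]?) = none := by
      cases hf : (PySem.List.pyRange 0 (board.length : Int) 1).find?
          (fun j => decide (0 < pvCell board j (t : Int))) with
      | some j => exact List.getElem?_eq_none (by simpa using h)
      | none => exact List.getElem?_eq_none (by simpa using h)
    rw [hL, List.getElem?_eq_none (by simpa using h)]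

-- ===== VERDICT (by name: the statement is the Claim_ definition above) =====
theorem getPointer_spec : Claim_equal_getPointer := by
  intro board _ _
  unfold Spec_getPointer
  rw [getPointer_eq_spec, getPointer_alt_eq_spec]
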